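-- pv_equiv track=rewrite | github.com/abhirup009/monopoly | services/game-engine/src/engine/movement.py | find_nearest_property_type
-- ===== SOURCE A (Python) =====
-- def find_nearest_property_type(current_position: int, property_type: str) -> int:
--     """Find the nearest property of a given type (railroad or utility).
--
--     Args:
--         current_position: Current board position
--         property_type: "railroad" or "utility"
--
--     Returns:
--         Position of the nearest property of that type
--     """
--     # Property positions by type
--     if property_type == "railroad":
--         positions = [5, 15, 25, 35]  # Reading, Pennsylvania, B&O, Short Line
--     elif property_type == "utility":
--         positions = [12, 28]  # Electric Company, Water Works
--     else:
--         raise ValueError(f"Unknown property type: {property_type}")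
--
--     # Find the next one clockwise
--     for pos in positions:
--         if pos > current_position:
--             return pos
--
--     # Wrap around to the first one
--     return positions[0]
-- ===== SOURCE B (Python) =====
-- def _bisect_right(positions, x):
--     """Hand-written bisect.bisect_right over a sorted list."""
--     lo, hi = 0, len(positions)
--     while lo < hi:
--         mid = (lo + hi) // 2
--         if x < positions[mid]:
--             hi = mid
--         else:
--             lo = mid + 1
--     return lo
--
--
-- def find_nearest_property_type(current_position: int, property_type: str) -> int:
--     if property_type == "railroad":
--         positions = [5, 15, 25, 35]
--     elif property_type == "utility":
--         positions = [12, 28]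
--     else:
--         raise ValueError(f"Unknown property type: {property_type}")
--     idx = _bisect_right(positions, current_position)
--     return positions[idx] if idx < len(positions) else positions[0]
-- ===== Notes on version B (the rewrite author's own statement) =====
-- stated objective: alternative
-- what changed: Replaces the linear scan for the first position greater than current_position with a hand-written bisect_right binary search over the sorted position list, indexing with wrap-around.
import Mathlib
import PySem

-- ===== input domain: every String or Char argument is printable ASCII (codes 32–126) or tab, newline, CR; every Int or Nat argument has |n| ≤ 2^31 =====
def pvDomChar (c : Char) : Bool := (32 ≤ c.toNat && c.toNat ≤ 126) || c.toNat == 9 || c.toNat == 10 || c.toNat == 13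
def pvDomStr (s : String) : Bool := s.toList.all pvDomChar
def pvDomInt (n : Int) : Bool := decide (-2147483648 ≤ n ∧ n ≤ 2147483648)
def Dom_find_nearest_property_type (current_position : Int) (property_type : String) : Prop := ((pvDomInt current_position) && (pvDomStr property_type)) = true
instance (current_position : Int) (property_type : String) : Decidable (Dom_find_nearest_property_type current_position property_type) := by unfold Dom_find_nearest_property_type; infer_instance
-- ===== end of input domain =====

-- B replaces A's linear scan with a hand-written bisect_right binary search; alternative decomposition, same results.
-- ===== PORT A =====
-- 'for pos in positions: if pos > current_position: return pos' with fall-through to positions[0]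
def scanNext (current_position : Int) : List Int → Option Int
  | [] => none
  | p :: rest => if p > current_position then some p else scanNext current_position rest

def find_nearest_property_type (current_position : Int) (property_type : String) : Int :=
  if property_type == "railroad" then
    match scanNext current_position [5, 15, 25, 35] with
    | some p => p
    | none => 5
  else if property_type == "utility" then
    match scanNext current_position [12, 28] with
    | some p => p
    | none => 12
  else 0  -- A raises ValueError here; excluded by Pre_

-- ===== PORT B =====
-- transliteration of Source B's hand-written bisect_right while-loop
def bisectR (positions : List Int) (x : Int) (lo hi : Nat) : Nat :=
  if _h : lo < hi then
    let mid := (lo + hi) / 2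
    if x < positions.getD mid 0 then bisectR positions x lo mid
    else bisectR positions x (mid + 1) hi
  else lo
termination_by hi - lo
decreasing_by all_goals omega

def find_nearest_property_type_alt (current_position : Int) (property_type : String) : Int :=
  if property_type == "railroad" then
    let positions : List Int := [5, 15, 25, 35]
    let idx := bisectR positions current_position 0 positions.length
    if idx < positions.length then positions.getD idx 0 else positions.getD 0 0
  else if property_type == "utility" then
    let positions : List Int := [12, 28]
    let idx := bisectR positions current_position 0 positions.length
    if idx < positions.length then positions.getD idx 0 else positions.getD 0 0
  else 0  -- B raises ValueError here; excluded by Pre_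

-- ===== PRECONDITION & SPEC =====
-- Pre_ excludes exactly the property types on which A raises ValueError.
def Pre_find_nearest_property_type (current_position : Int) (property_type : String) : Prop :=
  property_type = "railroad" ∨ property_type = "utility"
instance (current_position : Int) (property_type : String) : Decidable (Pre_find_nearest_property_type current_position property_type) := by unfold Pre_find_nearest_property_type; infer_instance
def pvWitness_find_nearest_property_type : Int × String := (7, "railroad")

def Spec_find_nearest_property_type (current_position : Int) (property_type : String) (out : Int) : Prop := out = find_nearest_property_type_alt current_position property_type
instance (current_position : Int) (property_type : String) (out : Int) : Decidable (Spec_find_nearest_property_type current_position property_type out) := by unfold Spec_find_nearest_property_type; infer_instance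

-- ===== CLAIM (what is proved, stated in full; the proofs are below) =====
def Claim_equal_find_nearest_property_type : Prop := ∀ (current_position : Int) (property_type : String), Dom_find_nearest_property_type current_position property_type → Pre_find_nearest_property_type current_position property_type → Spec_find_nearest_property_type current_position property_type (find_nearest_property_type current_position property_type)

-- ===== LEMMAS AND PROOFS =====

-- ===== VERDICT (by name: the statement is the Claim_ definition above) =====
lemma rail_eq (cp : Int) : find_nearest_property_type cp "railroad" = find_nearest_property_type_alt cp "railroad" := by
  by_cases h1 : cp < 5 <;> by_cases h2 : cp < 15 <;> by_cases h3 : cp < 25 <;> by_cases h4 : cp < 35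
  all_goals first
    | omega
    | (simp only [find_nearest_property_type, find_nearest_property_type_alt, scanNext]
       norm_num [h1, h2, h3, h4]
       repeat (rw [bisectR]; norm_num [h1, h2, h3, h4]))

lemma util_eq (cp : Int) : find_nearest_property_type cp "utility" = find_nearest_property_type_alt cp "utility" := by
  by_cases h1 : cp < 12 <;> by_cases h2 : cp < 28
  all_goals first
    | omega
    | (simp only [find_nearest_property_type, find_nearest_property_type_alt, scanNext]
       norm_num [h1, h2, show ¬("utility":String) = "railroad" from by decide]
       repeat (rw [bisectR]; norm_num [h1, h2]))

theorem find_nearest_property_type_spec : Claim_equal_find_nearest_property_type := by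
  intro cp pt _ hpre
  unfold Spec_find_nearest_property_type
  rcases hpre with h | h <;> subst h
  · exact rail_eq cp ▸ rfl
  · exact util_eq cp ▸ rfl
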